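-- pv_equiv track=rewrite | github.com/cafaray/atco.de-fights | arrayConversion.py | arrayConversion
-- ===== SOURCE A (Python) =====
-- def arrayConversion(inputArray):
--     x=1
--     while len(inputArray)>1:
--         r=[]
--         for i in range(0,len(inputArray),2):
--             if x%2==0:
--                 r+=[inputArray[i]*inputArray[i+1]]
--             else:
--                 r+=[inputArray[i]+inputArray[i+1]]
--         x+=1
--         inputArray = r
--     return inputArray[0]
-- ===== SOURCE B (Python) =====
-- def arrayConversion(inputArray):
--     # top-down divide & conquer: combine halves with + when log2(len) is odd, * when even
--     def f(arr):
--         if len(arr) <= 1: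
--             return arr[0]
--         m = len(arr) // 2
--         a = f(arr[:m])
--         b = f(arr[m:])
--         if (len(arr).bit_length() - 1) % 2 == 1:
--             return a + b
--         else:
--             return a * b
--     return f(inputArray)
-- ===== Notes on version B (the rewrite author's own statement) =====
-- stated objective: alternative
-- what changed: Replaces the bottom-up level-by-level rebuild of pair lists with a top-down divide-and-conquer recursion that splits the array into halves and combines with + or * according to the parity of log2 of the current length.
import Mathlib
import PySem

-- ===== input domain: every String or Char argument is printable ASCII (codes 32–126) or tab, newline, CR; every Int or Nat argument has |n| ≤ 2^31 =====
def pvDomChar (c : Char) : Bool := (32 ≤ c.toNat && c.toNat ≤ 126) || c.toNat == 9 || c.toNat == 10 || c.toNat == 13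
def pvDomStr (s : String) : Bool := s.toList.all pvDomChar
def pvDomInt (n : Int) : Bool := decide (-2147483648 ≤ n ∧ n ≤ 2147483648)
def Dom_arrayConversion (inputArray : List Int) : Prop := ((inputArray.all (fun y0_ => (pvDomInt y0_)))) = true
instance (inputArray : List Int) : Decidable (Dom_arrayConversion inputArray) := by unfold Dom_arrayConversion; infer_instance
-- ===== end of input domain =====

-- B replaces A's bottom-up level-by-level pair reduction with a top-down
-- divide-and-conquer recursion (alternative decomposition, same cost class).

-- ===== PORT A =====
-- one pass of A's inner for-loop: for i in range(0,len,2): r += [a[i] op a[i+1]];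
-- an odd leftover element makes Python raise IndexError (excluded by Pre_), here it is dropped
def pairStep (x : Int) : List Int → List Int
  | a :: b :: rest => (if x % 2 == 0 then a * b else a + b) :: pairStep x rest
  | _ => []

theorem pairStep_length : ∀ (x : Int) (l : List Int), (pairStep x l).length = l.length / 2
  | _, [] => by simp [pairStep]
  | _, [_] => by simp [pairStep]
  | x, _ :: _ :: rest => by
      simp [pairStep, pairStep_length x rest]; omega

-- A's while-loop; inputArray[0] on the empty list raises in Python (excluded by Pre_), here headD 0
def arrayConversionGo (x : Int) (l : List Int) : Int :=
  if h1 : 1 < l.length then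
    arrayConversionGo (x + 1) (pairStep x l)
  else
    l.headD 0
termination_by l.length
decreasing_by
  have := pairStep_length x l
  omega

def arrayConversion (inputArray : List Int) : Int := arrayConversionGo 1 inputArray

-- ===== PORT B =====
-- len(arr).bit_length() - 1 = Nat.log2 arr.length on the non-empty lists reached here
def fRec (arr : List Int) : Int :=
  if _h : arr.length ≤ 1 then arr.headD 0
  else
    let m := arr.length / 2
    let a := fRec (arr.take m)
    let b := fRec (arr.drop m)
    if (Nat.log2 arr.length) % 2 == 1 then a + b else a * b
termination_by arr.length
decreasing_by
  · simp; omega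
  · simp; omega

def arrayConversion_alt (inputArray : List Int) : Int := fRec inputArray

-- ===== PRECONDITION & SPEC =====
-- Pre_ excludes exactly the inputs on which A raises IndexError: the empty list and any
-- list whose length is not a power of two (an odd-length level makes inputArray[i+1] overrun).
def Pre_arrayConversion (inputArray : List Int) : Prop :=
  0 < inputArray.length ∧ inputArray.length = 2 ^ Nat.log2 inputArray.length
instance (inputArray : List Int) : Decidable (Pre_arrayConversion inputArray) := by
  unfold Pre_arrayConversion; infer_instance

def pvWitness_arrayConversion : List Int := [1, 2, 3, 4]

def Spec_arrayConversion (inputArray : List Int) (out : Int) : Prop := out = arrayConversion_alt inputArray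
instance (inputArray : List Int) (out : Int) : Decidable (Spec_arrayConversion inputArray out) := by unfold Spec_arrayConversion; infer_instance

-- ===== CLAIM (what is proved, stated in full; the proofs are below) =====
def Claim_equal_arrayConversion : Prop := ∀ (inputArray : List Int), Dom_arrayConversion inputArray → Pre_arrayConversion inputArray → Spec_arrayConversion inputArray (arrayConversion inputArray)

-- ===== LEMMAS AND PROOFS =====

-- the loop of A, unrolled level by level once the depth k is known
def levelFold (x : Int) (k : Nat) (l : List Int) : Int :=
  match k with
  | 0 => l.headD 0
  | k + 1 => levelFold (x + 1) k (pairStep x l)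

theorem go_eq_levelFold : ∀ (k : Nat) (x : Int) (l : List Int), l.length = 2 ^ k →
    arrayConversionGo x l = levelFold x k l := by
  intro k
  induction k with
  | zero =>
      intro x l hl
      rw [arrayConversionGo]
      simp at hl
      simp [hl, levelFold]
  | succ k ih =>
      intro x l hl
      rw [arrayConversionGo]
      have h1 : 1 < l.length := by
        rw [hl]; have := Nat.one_lt_two_pow_iff (n := k + 1); omega
      rw [dif_pos h1, levelFold]
      exact ih (x + 1) _ (by rw [pairStep_length, hl, Nat.pow_succ]; omega)

theorem pairStep_append : ∀ (m : Nat) (x : Int) (l1 l2 : List Int), l1.length = 2 * m →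
    pairStep x (l1 ++ l2) = pairStep x l1 ++ pairStep x l2 := by
  intro m
  induction m with
  | zero =>
      intro x l1 l2 h
      have : l1 = [] := List.eq_nil_of_length_eq_zero (by omega)
      simp [this, pairStep]
  | succ m ih =>
      intro x l1 l2 h
      match l1 with
      | [] => simp at h
      | [_] => simp at h; omega
      | a :: b :: rest =>
          simp at h
          simp [pairStep, ih x rest l2 (by omega)]

theorem pairStep_take (x : Int) (m : Nat) (l : List Int) (h : 2 * m ≤ l.length) :
    (pairStep x l).take m = pairStep x (l.take (2 * m)) := by
  have hsplit : l = l.take (2 * m) ++ l.drop (2 * m) := (List.take_append_drop _ l).symm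
  have hlen : (l.take (2 * m)).length = 2 * m := by simp; omega
  rw [hsplit, pairStep_append m x _ _ hlen]
  rw [List.take_append_of_le_length (by rw [pairStep_length, hlen]; omega)]
  have : (pairStep x (l.take (2 * m))).length = m := by rw [pairStep_length, hlen]; omega
  rw [List.take_of_length_le (by omega), ← hsplit]

theorem pairStep_drop (x : Int) (m : Nat) (l : List Int) (h : 2 * m ≤ l.length) :
    (pairStep x l).drop m = pairStep x (l.drop (2 * m)) := by
  have hsplit : l = l.take (2 * m) ++ l.drop (2 * m) := (List.take_append_drop _ l).symm
  have hlen : (l.take (2 * m)).length = 2 * m := by simp; omega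
  conv_lhs => rw [hsplit]
  rw [pairStep_append m x _ _ hlen]
  have hplen : (pairStep x (l.take (2 * m))).length = m := by rw [pairStep_length, hlen]; omega
  rw [List.drop_append_of_le_length (by omega), List.drop_of_length_le (by omega)]
  simp

theorem levelFold_split : ∀ (k : Nat) (x : Int) (l : List Int), l.length = 2 ^ (k + 1) →
    levelFold x (k + 1) l =
      (if (x + (k : Int)) % 2 == 0 then
        levelFold x k (l.take (2 ^ k)) * levelFold x k (l.drop (2 ^ k))
      else
        levelFold x k (l.take (2 ^ k)) + levelFold x k (l.drop (2 ^ k))) := by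
  intro k
  induction k with
  | zero =>
      intro x l hl
      match l, hl with
      | [a, b], _ =>
          have hL : levelFold x 1 [a, b] = (if x % 2 == 0 then a * b else a + b) := rfl
          rw [hL]
          simp only [Nat.pow_zero, List.take_succ_cons, List.take_zero, List.drop_succ_cons,
            List.drop_zero, levelFold, List.headD, Nat.cast_zero, add_zero]
  | succ k ih =>
      intro x l hl
      have hlp : (pairStep x l).length = 2 ^ (k + 1) := by
        rw [pairStep_length, hl, Nat.pow_succ]; omega
      have h2k : 2 * 2 ^ (k + 1) ≤ l.length := by rw [hl, Nat.pow_succ]; omega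
      have := ih (x + 1) (pairStep x l) hlp
      rw [show levelFold x (k + 1 + 1) l = levelFold (x + 1) (k + 1) (pairStep x l) from rfl, this]
      rw [pairStep_take x (2 ^ k) l (by rw [hl]; rw [Nat.pow_succ, Nat.pow_succ] at *; omega),
          pairStep_drop x (2 ^ k) l (by rw [hl]; rw [Nat.pow_succ, Nat.pow_succ] at *; omega)]
      have e1 : levelFold (x + 1) k (pairStep x (l.take (2 * 2 ^ k))) =
          levelFold x (k + 1) (l.take (2 ^ (k + 1))) := by
        rw [show (2 : Nat) ^ (k + 1) = 2 * 2 ^ k by rw [Nat.pow_succ]; omega]; rfl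
      have e2 : levelFold (x + 1) k (pairStep x (l.drop (2 * 2 ^ k))) =
          levelFold x (k + 1) (l.drop (2 ^ (k + 1))) := by
        rw [show (2 : Nat) ^ (k + 1) = 2 * 2 ^ k by rw [Nat.pow_succ]; omega]; rfl
      rw [e1, e2]
      have hx : x + 1 + (k : Int) = x + ((k : Int) + 1) := by ring
      rw [hx]
      push_cast
      rfl

theorem log2_two_pow (n : Nat) : Nat.log2 (2 ^ n) = n := by
  simp [Nat.log2_eq_log_two, Nat.log_pow]

theorem fRec_eq_levelFold : ∀ (k : Nat) (l : List Int), l.length = 2 ^ k →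
    fRec l = levelFold 1 k l := by
  intro k
  induction k with
  | zero =>
      intro l hl
      rw [fRec]
      simp at hl
      simp [hl, levelFold]
  | succ k ih =>
      intro l hl
      have h1 : ¬ l.length ≤ 1 := by
        rw [hl]; have := Nat.one_lt_two_pow_iff (n := k + 1); omega
      rw [fRec, dif_neg h1]
      have hm : l.length / 2 = 2 ^ k := by rw [hl, Nat.pow_succ]; omega
      have htk : (l.take (2 ^ k)).length = 2 ^ k := by
        rw [List.length_take, hl, Nat.pow_succ]; omega
      have hdk : (l.drop (2 ^ k)).length = 2 ^ k := by
        rw [List.length_drop, hl, Nat.pow_succ]; omega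
      simp only [hm]
      rw [hl, log2_two_pow, ih _ htk, ih _ hdk, levelFold_split k 1 l hl]
      simp only [beq_iff_eq]
      split_ifs with h1 h2 h3 <;> first | rfl | (exfalso; omega)

-- ===== VERDICT (by name: the statement is the Claim_ definition above) =====
theorem arrayConversion_spec : Claim_equal_arrayConversion := by
  intro l _ hpre
  obtain ⟨hpos, hpow⟩ := hpre
  unfold Spec_arrayConversion arrayConversion arrayConversion_alt
  rw [go_eq_levelFold (Nat.log2 l.length) 1 l hpow, fRec_eq_levelFold (Nat.log2 l.length) l hpow]
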